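-- pv_equiv track=rewrite | github.com/kaluginpeter/Algorithms_and_structures_tasks | CodeWars/5kyu/Maximize_your_earnings_with_mandatory_breaks.py | maximize_earnings
-- ===== SOURCE A (Python) =====
-- def maximize_earnings(earnings, k):
--     if not earnings: return 0
--     n = len(earnings)
--     dp = [[-1 for _ in range(k + 1)] for _ in range(n + 1)]
--     dp[0][0] = 0
--     for i in range(1, n + 1):
--         current_earning = earnings[i - 1]
--         max_prev = max(dp[i - 1][j] for j in range(k + 1))
--         if max_prev != -1: dp[i][0] = max_prev
--         for j in range(1, k + 1):
--             if dp[i - 1][j - 1] != -1: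
--                 if dp[i][j] == -1:
--                     dp[i][j] = dp[i - 1][j - 1] + current_earning
--                 else:
--                     dp[i][j] = max(dp[i][j], dp[i - 1][j - 1] + current_earning)
--     max_earnings = max(dp[n][j] for j in range(k + 1))
--     return max_earnings if max_earnings != -1 else 0
-- ===== SOURCE B (Python) =====
-- def maximize_earnings(earnings, k):
--     n = len(earnings)
--     P = [0]
--     for x in earnings:
--         P.append(P[-1] + x)
--     H = [0]
--     for i in range(1, n + 1):
--         best = H[i - 1]
--         m = k if k < i else i
--         for j in range(1, m + 1):
--             s = i - j
--             base = H[s - 1] if s >= 1 else 0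
--             cand = base + P[i] - P[s]
--             if cand > best:
--                 best = cand
--         H.append(best)
--     return H[n]
-- ===== Notes on version B (the rewrite author's own statement) =====
-- stated objective: faster
-- what changed: Replaces A's (n+1)x(k+1) run-length state table with -1 sentinels by a one-dimensional best-prefix DP over precomputed prefix sums: best[i] = max(best[i-1], max over run lengths j<=min(k,i) of best-before-run + window sum), so no table, no sentinel bookkeeping, and the inner scan is bounded by min(k,i) instead of k.
import Mathlib
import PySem

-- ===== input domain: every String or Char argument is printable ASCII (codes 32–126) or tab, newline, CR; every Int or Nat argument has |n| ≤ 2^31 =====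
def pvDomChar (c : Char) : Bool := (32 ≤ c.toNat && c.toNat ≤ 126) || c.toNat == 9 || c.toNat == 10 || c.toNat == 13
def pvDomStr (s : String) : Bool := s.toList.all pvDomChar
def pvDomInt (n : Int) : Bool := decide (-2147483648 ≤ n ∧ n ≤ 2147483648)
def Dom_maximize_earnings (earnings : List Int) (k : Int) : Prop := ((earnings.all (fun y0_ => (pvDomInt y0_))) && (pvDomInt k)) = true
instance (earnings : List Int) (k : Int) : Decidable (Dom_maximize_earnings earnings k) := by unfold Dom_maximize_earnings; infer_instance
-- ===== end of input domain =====

-- B replaces A's (n+1)×(k+1) run-length/sentinel DP table by a 1D best-prefix DP over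
-- prefix sums (one value per day, inner scan over at most min(k, i) run lengths).

-- ===== PORT A =====
def pvRowInit (k : Int) : List Int :=
  (PySem.List.pyRange 0 (k + 1) 1).map (fun _ => (-1 : Int))

-- one iteration of A's inner loop over run lengths j
def pvInnerA (i current_earning : Int) (dp : List (List Int)) (j : Int) : List (List Int) :=
  if PySem.List.pyGetD (PySem.List.pyGetD dp (i - 1) []) (j - 1) 0 ≠ -1 then
    if PySem.List.pyGetD (PySem.List.pyGetD dp i []) j 0 = -1 then
      PySem.List.pySetD dp i (PySem.List.pySetD (PySem.List.pyGetD dp i []) j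
        (PySem.List.pyGetD (PySem.List.pyGetD dp (i - 1) []) (j - 1) 0 + current_earning))
    else
      PySem.List.pySetD dp i (PySem.List.pySetD (PySem.List.pyGetD dp i []) j
        (max (PySem.List.pyGetD (PySem.List.pyGetD dp i []) j 0)
             (PySem.List.pyGetD (PySem.List.pyGetD dp (i - 1) []) (j - 1) 0 + current_earning)))
  else dp

-- one iteration of A's outer loop (i = day index, 1-based)
def pvBodyA (earnings : List Int) (k : Int) (dp : List (List Int)) (i : Int) : List (List Int) :=
  let current_earning := PySem.List.pyGetD earnings (i - 1) 0
  let max_prev := (PySem.List.max? ((PySem.List.pyRange 0 (k + 1) 1).map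
      (fun j => PySem.List.pyGetD (PySem.List.pyGetD dp (i - 1) []) j 0)) (fun x => x)).getD 0
  let dp := if max_prev ≠ -1 then
      PySem.List.pySetD dp i (PySem.List.pySetD (PySem.List.pyGetD dp i []) 0 max_prev)
    else dp
  (PySem.List.pyRange 1 (k + 1) 1).foldl (pvInnerA i current_earning) dp

def maximize_earnings (earnings : List Int) (k : Int) : Int :=
  if earnings = [] then 0
  else
    let n : Int := earnings.length
    let dp : List (List Int) := (PySem.List.pyRange 0 (n + 1) 1).map (fun _ => pvRowInit k)
    let dp := PySem.List.pySetD dp 0 (PySem.List.pySetD (PySem.List.pyGetD dp 0 []) 0 0)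
    let dp := (PySem.List.pyRange 1 (n + 1) 1).foldl (pvBodyA earnings k) dp
    let max_earnings := (PySem.List.max? ((PySem.List.pyRange 0 (k + 1) 1).map
        (fun j => PySem.List.pyGetD (PySem.List.pyGetD dp n []) j 0)) (fun x => x)).getD 0
    if max_earnings ≠ -1 then max_earnings else 0

-- ===== PORT B =====
-- one iteration of B's loop: append best value for prefix of length i
def pvBodyB (k : Int) (P : List Int) (H : List Int) (i : Int) : List Int :=
  let best := PySem.List.pyGetD H (i - 1) 0
  let m := if k < i then k else i
  let best := (PySem.List.pyRange 1 (m + 1) 1).foldl (fun best j =>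
    let s := i - j
    let base := if 1 ≤ s then PySem.List.pyGetD H (s - 1) 0 else 0
    let cand := base + PySem.List.pyGetD P i 0 - PySem.List.pyGetD P s 0
    if best < cand then cand else best) best
  H ++ [best]

def maximize_earnings_alt (earnings : List Int) (k : Int) : Int :=
  let n : Int := earnings.length
  let P : List Int := earnings.foldl (fun P x => P ++ [PySem.List.pyGetD P (-1) 0 + x]) [0]
  let H : List Int := (PySem.List.pyRange 1 (n + 1) 1).foldl (pvBodyB k P) [0]
  PySem.List.pyGetD H n 0

-- ===== PRECONDITION & SPEC =====
-- Pre_ excludes only nonempty earnings with k < 0, where A raises IndexError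
-- (assignment dp[0][0] = 0 on an empty row); B naturally returns 0 there.
def Pre_maximize_earnings (earnings : List Int) (k : Int) : Prop := earnings = [] ∨ 0 ≤ k
instance (earnings : List Int) (k : Int) : Decidable (Pre_maximize_earnings earnings k) := by
  unfold Pre_maximize_earnings; infer_instance

def pvWitness_maximize_earnings : List Int × Int := ([3, -1, 4], 2)

def Spec_maximize_earnings (earnings : List Int) (k : Int) (out : Int) : Prop :=
  out = maximize_earnings_alt earnings k
instance (earnings : List Int) (k : Int) (out : Int) : Decidable (Spec_maximize_earnings earnings k out) := by
  unfold Spec_maximize_earnings; infer_instance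

-- ===== CLAIM (what is proved, stated in full; the proofs are below) =====
def Claim_equal_maximize_earnings : Prop := ∀ (earnings : List Int) (k : Int), Dom_maximize_earnings earnings k → Pre_maximize_earnings earnings k → Spec_maximize_earnings earnings k (maximize_earnings earnings k)

-- ===== LEMMAS AND PROOFS =====

-- ---- mathematical model of A: rows of the DP table ----

-- prefix sum of the first i earnings
def pvS (e : List Int) (i : Nat) : Int := (e.take i).sum

-- Python max() of a list (unused default 0 for [])
def pvLmax : List Int → Int
  | [] => 0
  | a :: t => t.foldl max a

def pvRow (e : List Int) (K : Nat) : Nat → List Int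
  | 0 => (List.range (K + 1)).map (fun j => if j = 0 then (0 : Int) else -1)
  | i + 1 =>
      let r := pvRow e K i
      let m := pvLmax r
      (List.range (K + 1)).map (fun j =>
        if j = 0 then (if m ≠ -1 then m else -1)
        else (if r.getD (j - 1) (-1) ≠ -1 then r.getD (j - 1) (-1) + e.getD i 0 else -1))

def pvA (e : List Int) (K : Nat) (i j : Nat) : Int := (pvRow e K i).getD j (-1)
def pvM (e : List Int) (K : Nat) (i : Nat) : Int := pvLmax (pvRow e K i)

-- ---- mathematical model of B ----

def pvHlist (e : List Int) (K : Nat) : Nat → List Int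
  | 0 => [0]
  | i + 1 =>
      pvHlist e K i ++
        [(List.range (min K (i + 1))).foldl (fun b t =>
          max b ((if i - t = 0 then 0 else (pvHlist e K i).getD (i - t - 1) 0)
            + pvS e (i + 1) - pvS e (i - t))) ((pvHlist e K i).getD i 0)]

def pvH (e : List Int) (K : Nat) (i : Nat) : Int := (pvHlist e K i).getD i 0

def pvBase (e : List Int) (K : Nat) : Nat → Int
  | 0 => 0
  | s + 1 => pvH e K s

-- ---- generic max-fold lemmas ----

theorem pv_foldl_max_le {α : Type} (l : List α) (f : α → Int) (B : Int) :
    ∀ a, a ≤ B → (∀ x ∈ l, f x ≤ B) → l.foldl (fun b x => max b (f x)) a ≤ B := by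
  induction l with
  | nil => intro a ha _; simpa using ha
  | cons y t ih =>
      intro a ha h
      simp only [List.foldl_cons]
      exact ih _ (max_le ha (h y (by simp))) (fun x hx => h x (by simp [hx]))

theorem pv_lmax_ge (l : List Int) (x : Int) (hx : x ∈ l) : x ≤ pvLmax l := by
  cases l with
  | nil => simp at hx
  | cons a t =>
      simp only [pvLmax]
      rcases List.mem_cons.1 hx with h | h
      · subst h; exact (PySem.List.le_foldl_max t x).1
      · exact (PySem.List.le_foldl_max t a).2 x h

theorem pv_lmax_mem (l : List Int) (hl : l ≠ []) : pvLmax l ∈ l := by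
  cases l with
  | nil => simp at hl
  | cons a t =>
      simp only [pvLmax]
      rcases PySem.List.foldl_max_mem t a with h | h
      · rw [h]; simp
      · simp [h]

theorem pv_lmax_le (l : List Int) (hl : l ≠ []) (B : Int) (h : ∀ x ∈ l, x ≤ B) : pvLmax l ≤ B :=
  h _ (pv_lmax_mem l hl)

-- ---- basic facts about the models ----

theorem pv_length_row (e : List Int) (K : Nat) (i : Nat) : (pvRow e K i).length = K + 1 := by
  cases i <;> simp [pvRow]

theorem pv_row_ne_nil (e : List Int) (K : Nat) (i : Nat) : pvRow e K i ≠ [] := by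
  have := pv_length_row e K i
  intro h; rw [h] at this; simp at this

theorem pvA_zero (e : List Int) (K : Nat) (j : Nat) :
    pvA e K 0 j = if j = 0 then 0 else -1 := by
  unfold pvA pvRow
  by_cases hj : j < K + 1
  · rw [List.getD_eq_getElem _ _ (by simpa using hj)]
    simp
  · rw [List.getD_eq_default _ _ (by simpa using hj)]
    have : j ≠ 0 := by omega
    simp [this]

theorem pvA_succ_zero (e : List Int) (K : Nat) (i : Nat) :
    pvA e K (i + 1) 0 = if pvM e K i ≠ -1 then pvM e K i else -1 := by
  unfold pvA pvRow pvM
  rw [List.getD_eq_getElem _ _ (by simp)]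
  simp

theorem pvA_succ (e : List Int) (K : Nat) (i j : Nat) :
    pvA e K (i + 1) (j + 1) =
      if j + 1 ≤ K then (if pvA e K i j ≠ -1 then pvA e K i j + e.getD i 0 else -1) else -1 := by
  unfold pvA
  by_cases hj : j + 1 ≤ K
  · conv_lhs => rw [pvRow]
    rw [List.getD_eq_getElem _ _ (by simp; omega)]
    simp [hj]
  · rw [List.getD_eq_default _ _ (by rw [pv_length_row]; omega)]
    simp [hj]

theorem pvA_zero_nonneg (e : List Int) (K : Nat) (i : Nat) : 0 ≤ pvA e K i 0 := by
  induction i with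
  | zero => simp [pvA_zero]
  | succ i ih =>
      have hmem : pvA e K i 0 ∈ pvRow e K i := by
        unfold pvA
        rw [List.getD_eq_getElem _ _ (by rw [pv_length_row]; omega)]
        exact List.getElem_mem _
      have hM : pvA e K i 0 ≤ pvM e K i := pv_lmax_ge _ _ hmem
      rw [pvA_succ_zero]
      have : pvM e K i ≠ -1 := by omega
      simp [this]; omega

theorem pvM_nonneg (e : List Int) (K : Nat) (i : Nat) : 0 ≤ pvM e K i := by
  have hmem : pvA e K i 0 ∈ pvRow e K i := by
    unfold pvA
    rw [List.getD_eq_getElem _ _ (by rw [pv_length_row]; omega)]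
    exact List.getElem_mem _
  exact le_trans (pvA_zero_nonneg e K i) (pv_lmax_ge _ _ hmem)

theorem pvA_le_M (e : List Int) (K : Nat) (i j : Nat) (hj : j ≤ K) :
    pvA e K i j ≤ pvM e K i := by
  apply pv_lmax_ge
  unfold pvA
  rw [List.getD_eq_getElem _ _ (by rw [pv_length_row]; omega)]
  exact List.getElem_mem _

theorem pvM_exists (e : List Int) (K : Nat) (i : Nat) :
    ∃ j ≤ K, pvM e K i = pvA e K i j := by
  have hmem := pv_lmax_mem (pvRow e K i) (pv_row_ne_nil e K i)
  rw [List.mem_iff_getElem] at hmem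
  obtain ⟨j, hj, hval⟩ := hmem
  rw [pv_length_row] at hj
  refine ⟨j, by omega, ?_⟩
  unfold pvA
  rw [List.getD_eq_getElem _ _ (by rw [pv_length_row]; omega)]
  exact hval.symm

theorem pvS_succ (e : List Int) (i : Nat) : pvS e (i + 1) = pvS e i + e.getD i 0 := by
  unfold pvS
  by_cases h : i < e.length
  · rw [List.sum_take_succ e i h]
    simp [List.getD, List.getElem?_eq_getElem h]
  · rw [List.take_of_length_le (by omega), List.take_of_length_le (by omega)]
    simp [List.getD, List.getElem?_eq_none (show e.length ≤ i by omega)]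

theorem pv_foldl_congr {α β : Type} (l : List α) (f g : β → α → β) (a : β)
    (h : ∀ b x, x ∈ l → f b x = g b x) : l.foldl f a = l.foldl g a := by
  induction l generalizing a with
  | nil => rfl
  | cons y t ih =>
      simp only [List.foldl_cons]
      rw [h a y (by simp)]
      exact ih _ (fun b x hx => h b x (by simp [hx]))

-- chain characterisation: a live run state is its start's rest value plus the run's sum
theorem pv_chain (e : List Int) (K : Nat) :
    ∀ j i, 1 ≤ j → pvA e K i j ≠ -1 →
      j ≤ i ∧ j ≤ K ∧ pvA e K i j = pvA e K (i - j) 0 + pvS e i - pvS e (i - j) := by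
  intro j
  induction j with
  | zero => intro i h; omega
  | succ j ih =>
      intro i _ hne
      cases i with
      | zero =>
          rw [pvA_zero] at hne
          exact absurd (if_neg (by omega)) hne
      | succ i =>
          rw [pvA_succ] at hne
          by_cases hjK : j + 1 ≤ K
          · rw [if_pos hjK] at hne
            by_cases hprev : pvA e K i j ≠ -1
            · rw [if_pos hprev] at hne
              cases Nat.eq_zero_or_pos j with
              | inl hj0 =>
                  subst hj0
                  refine ⟨by omega, hjK, ?_⟩
                  rw [pvA_succ, if_pos hjK, if_pos hprev]
                  have hs : i + 1 - 1 = i := by omega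
                  rw [hs, pvS_succ]
                  omega
              | inr hj1 =>
                  obtain ⟨hji, hjK2, hval⟩ := ih i hj1 hprev
                  refine ⟨by omega, hjK, ?_⟩
                  rw [pvA_succ, if_pos hjK, if_pos hprev, hval, pvS_succ]
                  have hs : i + 1 - (j + 1) = i - j := by omega
                  rw [hs]
                  omega
            · rw [if_neg hprev] at hne
              exact absurd rfl hne
          · rw [if_neg hjK] at hne
            exact absurd rfl hne

-- domination: any live state, pushed d more working days, is dominated by row (s + d)'s max
theorem pv_dom (e : List Int) (K : Nat) :
    ∀ d s j, j + d ≤ K → pvA e K s j ≠ -1 →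
      pvA e K s j + pvS e (s + d) - pvS e s ≤ pvM e K (s + d) := by
  intro d
  induction d with
  | zero =>
      intro s j hj hne
      simpa using pvA_le_M e K s j (by omega)
  | succ d ih =>
      intro s j hj hne
      have hstep : pvA e K (s + 1) (j + 1) = pvA e K s j + e.getD s 0 := by
        rw [pvA_succ]
        simp [show j + 1 ≤ K by omega, hne]
      by_cases hdead : pvA e K (s + 1) (j + 1) = -1
      · -- the extended run collapses onto the sentinel; restart from the (≥ 0) rest state
        have h0 : (0 : Int) ≤ pvA e K (s + 1) 0 := pvA_zero_nonneg e K (s + 1)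
        have := ih (s + 1) 0 (by omega) (by omega)
        have hsum : pvS e (s + 1) = pvS e s + e.getD s 0 := pvS_succ e s
        have hv : pvA e K s j + e.getD s 0 = -1 := by rw [← hstep]; exact hdead
        have hgoal : pvA e K s j + pvS e (s + 1 + d) - pvS e s ≤ pvA e K (s + 1) 0 + pvS e (s + 1 + d) - pvS e (s + 1) := by
          omega
        calc pvA e K s j + pvS e (s + (d + 1)) - pvS e s
            = pvA e K s j + pvS e (s + 1 + d) - pvS e s := by ring_nf
          _ ≤ pvA e K (s + 1) 0 + pvS e (s + 1 + d) - pvS e (s + 1) := hgoal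
          _ ≤ pvM e K (s + 1 + d) := this
          _ = pvM e K (s + (d + 1)) := by ring_nf
      · have := ih (s + 1) (j + 1) (by omega) hdead
        rw [hstep] at this
        have hsum : pvS e (s + 1) = pvS e s + e.getD s 0 := pvS_succ e s
        calc pvA e K s j + pvS e (s + (d + 1)) - pvS e s
            = pvA e K s j + e.getD s 0 + pvS e (s + 1 + d) - pvS e (s + 1) := by
              rw [hsum]; ring_nf
          _ ≤ pvM e K (s + 1 + d) := this
          _ = pvM e K (s + (d + 1)) := by ring_nf

-- ---- facts about the B model ----

theorem pv_length_Hlist (e : List Int) (K : Nat) (i : Nat) : (pvHlist e K i).length = i + 1 := by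
  induction i with
  | zero => simp [pvHlist]
  | succ i ih => simp [pvHlist, ih]

theorem pvH_prefix (e : List Int) (K : Nat) (i m : Nat) (h : m ≤ i) :
    (pvHlist e K i).getD m 0 = pvH e K m := by
  induction i with
  | zero =>
      have : m = 0 := by omega
      subst this; rfl
  | succ i ih =>
      by_cases hm : m ≤ i
      · unfold pvHlist
        rw [List.getD_append _ _ _ _ (by rw [pv_length_Hlist]; omega)]
        exact ih hm
      · have : m = i + 1 := by omega
        subst this; rfl

theorem pvH_succ (e : List Int) (K : Nat) (i : Nat) :
    pvH e K (i + 1) = (List.range (min K (i + 1))).foldl (fun b t =>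
      max b (pvBase e K (i - t) + pvS e (i + 1) - pvS e (i - t))) (pvH e K i) := by
  have hlen : (pvHlist e K i).length = i + 1 := pv_length_Hlist e K i
  conv_lhs => unfold pvH pvHlist
  rw [List.getD_append_right _ _ _ _ (by omega), hlen]
  simp only [Nat.sub_self, List.getD_cons_zero]
  rw [show (pvHlist e K i).getD i 0 = pvH e K i from rfl]
  apply pv_foldl_congr
  intro b t ht
  rw [List.mem_range] at ht
  congr 1
  by_cases hs : i - t = 0
  · simp [hs, pvBase]
  · have h1 : i - t - 1 ≤ i := by omega
    rw [pvH_prefix e K i (i - t - 1) h1]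
    obtain ⟨s', hs'⟩ : ∃ s', i - t = s' + 1 := ⟨i - t - 1, by omega⟩
    rw [hs']
    simp [pvBase]

theorem pvH_mono (e : List Int) (K : Nat) (i : Nat) : pvH e K i ≤ pvH e K (i + 1) := by
  rw [pvH_succ]
  exact (PySem.List.le_foldl_max_int (List.range (min K (i + 1)))
    (fun t => pvBase e K (i - t) + pvS e (i + 1) - pvS e (i - t)) (pvH e K i)).1

theorem pv_cand_le_H (e : List Int) (K : Nat) (i t : Nat) (ht : t < min K (i + 1)) :
    pvBase e K (i - t) + pvS e (i + 1) - pvS e (i - t) ≤ pvH e K (i + 1) := by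
  rw [pvH_succ]
  exact (PySem.List.le_foldl_max_int (List.range (min K (i + 1)))
    (fun t => pvBase e K (i - t) + pvS e (i + 1) - pvS e (i - t)) (pvH e K i)).2 t
    (List.mem_range.2 ht)

-- ---- the core identity: A's row maximum is B's value ----

theorem pvM_eq_H (e : List Int) (K : Nat) : ∀ i, pvM e K i = pvH e K i := by
  intro i
  induction i using Nat.strong_induction_on with
  | _ i IH =>
      cases i with
      | zero =>
          have h1 : pvM e K 0 ≤ 0 := by
            apply pv_lmax_le _ (pv_row_ne_nil e K 0)
            intro x hx
            unfold pvRow at hx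
            simp only [List.mem_map, List.mem_range] at hx
            obtain ⟨j, _, rfl⟩ := hx
            split_ifs <;> omega
          have h2 := pvM_nonneg e K 0
          have h3 : pvM e K 0 = 0 := le_antisymm h1 h2
          rw [h3]; rfl
      | succ i =>
          have hbase : ∀ s, s ≤ i → pvA e K s 0 = pvBase e K s := by
            intro s hs
            cases s with
            | zero => rw [pvA_zero]; rfl
            | succ s =>
                rw [pvA_succ_zero]
                have h0 := pvM_nonneg e K s
                rw [if_pos (by omega), IH s (by omega)]
                rfl
          apply le_antisymm
          · obtain ⟨j, hjK, hM⟩ := pvM_exists e K (i + 1)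
            cases j with
            | zero =>
                rw [hM, pvA_succ_zero]
                have h0 := pvM_nonneg e K i
                rw [if_pos (by omega), IH i (by omega)]
                exact pvH_mono e K i
            | succ j =>
                by_cases hne : pvA e K (i + 1) (j + 1) = -1
                · have h0 := pvM_nonneg e K (i + 1)
                  rw [hM, hne] at h0
                  exact absurd h0 (by norm_num)
                · obtain ⟨hji, hjK2, hval⟩ := pv_chain e K (j + 1) (i + 1) (by omega) hne
                  rw [hM, hval]
                  have hs : i + 1 - (j + 1) = i - j := by omega
                  rw [hs, hbase (i - j) (by omega)]
                  exact pv_cand_le_H e K i j (by omega)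
          · rw [pvH_succ]
            apply pv_foldl_max_le
            · have h0 := pvM_nonneg e K i
              have h1 : pvA e K (i + 1) 0 = pvM e K i := by
                rw [pvA_succ_zero, if_pos (by omega)]
              calc pvH e K i = pvM e K i := (IH i (by omega)).symm
                _ = pvA e K (i + 1) 0 := h1.symm
                _ ≤ pvM e K (i + 1) := pvA_le_M e K (i + 1) 0 (by omega)
            · intro t ht
              rw [List.mem_range] at ht
              have hd := pv_dom e K (t + 1) (i - t) 0 (by omega)
                (by have := pvA_zero_nonneg e K (i - t); omega)
              have hst : i - t + (t + 1) = i + 1 := by omega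
              rw [hst] at hd
              rw [← hbase (i - t) (by omega)]
              simpa using hd

-- ---- plumbing: getters for map-range lists and the table ----

theorem pv_getD_map_range {α : Type} (f : Nat → α) (n r : Nat) (d : α) (hr : r < n) :
    ((List.range n).map f).getD r d = f r := by
  rw [List.getD_eq_getElem _ _ (by simpa using hr)]
  simp

def pvTbl (e : List Int) (k : Int) (m : Nat) : List (List Int) :=
  (List.range (e.length + 1)).map (fun r => if r ≤ m then pvRow e k.toNat r else pvRowInit k)

def pvPartial (e : List Int) (K m t : Nat) : List Int :=
  (List.range (K + 1)).map (fun j =>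
    if j = 0 then pvA e K (m + 1) 0 else if j ≤ t then pvA e K (m + 1) j else -1)

theorem pv_rowInit_eq (k : Int) (hk : 0 ≤ k) :
    pvRowInit k = List.replicate (k.toNat + 1) (-1) := by
  unfold pvRowInit
  apply List.ext_getElem
  · simp [PySem.List.length_pyRange_one]; omega
  · intro i h1 h2; simp

theorem pv_tbl_get (e : List Int) (k : Int) (m r : Nat) (hr : r ≤ e.length) :
    PySem.List.pyGetD (pvTbl e k m) ((r : Nat) : Int) [] =
      if r ≤ m then pvRow e k.toNat r else pvRowInit k := by
  rw [PySem.List.pyGetD_natCast]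
  unfold pvTbl
  rw [pv_getD_map_range _ _ _ _ (by omega)]

theorem pv_row_get (e : List Int) (K : Nat) (i t : Nat) (ht : t ≤ K) :
    PySem.List.pyGetD (pvRow e K i) ((t : Nat) : Int) 0 = pvA e K i t := by
  rw [PySem.List.pyGetD_natCast]
  unfold pvA
  rw [List.getD_eq_getElem _ _ (by rw [pv_length_row]; omega),
      List.getD_eq_getElem _ _ (by rw [pv_length_row]; omega)]

theorem pv_partial_get (e : List Int) (K m t j : Nat) (hj : j ≤ K) :
    PySem.List.pyGetD (pvPartial e K m t) ((j : Nat) : Int) 0 =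
      if j = 0 then pvA e K (m + 1) 0 else if j ≤ t then pvA e K (m + 1) j else -1 := by
  rw [PySem.List.pyGetD_natCast]
  unfold pvPartial
  rw [pv_getD_map_range _ _ _ _ (by omega)]

theorem pv_maxq (l : List Int) (hl : l ≠ []) :
    (PySem.List.max? l (fun x => x)).getD 0 = pvLmax l := by
  cases l with
  | nil => exact absurd rfl hl
  | cons a t => rw [PySem.List.max?_id_cons]; rfl

theorem pv_map_row (e : List Int) (k : Int) (hk : 0 ≤ k) (r : Nat) :
    (PySem.List.pyRange 0 (k + 1) 1).map (fun j => PySem.List.pyGetD (pvRow e k.toNat r) j 0) =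
      pvRow e k.toNat r := by
  have hlen : k + 1 = ((pvRow e k.toNat r).length : Int) := by
    rw [pv_length_row]; push_cast; omega
  rw [hlen, PySem.List.map_pyGetD_pyRange_zero']

theorem pv_tblset_get (e : List Int) (k : Int) (m : Nat) (X : List Int) (r : Nat)
    (hr : r ≤ e.length) :
    PySem.List.pyGetD ((pvTbl e k m).set (m + 1) X) ((r : Nat) : Int) [] =
      if r = m + 1 then X else (if r ≤ m then pvRow e k.toNat r else pvRowInit k) := by
  rw [PySem.List.pyGetD_natCast]
  rw [List.getD_eq_getElem _ _ (by simp [pvTbl]; omega)]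
  rw [List.getElem_set]
  by_cases h : r = m + 1
  · simp [h]
  · simp only [show ¬ (m + 1 = r) by omega, if_false, h, if_false]
    unfold pvTbl
    simp

theorem pv_partial_zero (e : List Int) (k : Int) (hk : 0 ≤ k) (m : Nat) :
    PySem.List.pySetD (pvRowInit k) 0 (pvM e k.toNat m) = pvPartial e k.toNat m 0 := by
  rw [PySem.List.pySetD_of_nonneg _ _ (by norm_num), pv_rowInit_eq k hk]
  apply List.ext_getElem
  · simp [pvPartial]
  · intro j h1 h2
    rw [List.getElem_set]
    simp only [pvPartial, List.getElem_map, List.getElem_range]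
    by_cases hj : j = 0
    · have h0 := pvM_nonneg e k.toNat m
      simp [hj, pvA_succ_zero, if_pos (show pvM e k.toNat m ≠ -1 by omega)]
    · simp [hj]
      intro h
      exact absurd h.symm hj

theorem pv_partial_full (e : List Int) (K m : Nat) :
    pvPartial e K m K = pvRow e K (m + 1) := by
  apply List.ext_getElem
  · simp [pvPartial, pv_length_row]
  · intro j h1 h2
    simp only [pvPartial, List.getElem_map, List.getElem_range]
    have hR : (pvRow e K (m + 1))[j] = pvA e K (m + 1) j := by
      unfold pvA
      rw [List.getD_eq_getElem _ _ h2]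
    rw [hR]
    have hjK : j ≤ K := by
      simp only [pvPartial, List.length_map, List.length_range] at h1; omega
    by_cases hj : j = 0
    · simp [hj]
    · simp [hj, hjK]

theorem pv_tbl_set_succ (e : List Int) (k : Int) (m : Nat) (hm : m < e.length) :
    (pvTbl e k m).set (m + 1) (pvRow e k.toNat (m + 1)) = pvTbl e k (m + 1) := by
  apply List.ext_getElem
  · simp [pvTbl]
  · intro r h1 h2
    rw [List.getElem_set]
    simp only [pvTbl, List.getElem_map, List.getElem_range]
    by_cases h : m + 1 = r
    · simp [h.symm]
    · have : (r ≤ m) = (r ≤ m + 1) := by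
        simp only [eq_iff_iff]; omega
      simp only [h, if_false, this]

theorem pv_inner_step (e : List Int) (k : Int) (hk : 0 ≤ k) (m t : Nat) (hm : m < e.length)
    (ht : t < k.toNat) :
    pvInnerA ((m + 1 : Nat) : Int) (e.getD m 0)
        ((pvTbl e k m).set (m + 1) (pvPartial e k.toNat m t)) (1 + (t : Int)) =
      (pvTbl e k m).set (m + 1) (pvPartial e k.toNat m (t + 1)) := by
  have hi1 : ((m + 1 : Nat) : Int) - 1 = ((m : Nat) : Int) := by push_cast; ring
  have hj1 : 1 + (t : Int) - 1 = ((t : Nat) : Int) := by push_cast; ring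
  have hjc : 1 + (t : Int) = ((t + 1 : Nat) : Int) := by push_cast; ring
  have hprev_row : PySem.List.pyGetD ((pvTbl e k m).set (m + 1) (pvPartial e k.toNat m t))
      ((m : Nat) : Int) [] = pvRow e k.toNat m := by
    rw [pv_tblset_get e k m _ m (by omega)]
    rw [if_neg (by omega), if_pos (le_refl m)]
  have hrow_i : PySem.List.pyGetD ((pvTbl e k m).set (m + 1) (pvPartial e k.toNat m t))
      ((m + 1 : Nat) : Int) [] = pvPartial e k.toNat m t := by
    rw [pv_tblset_get e k m _ (m + 1) (by omega), if_pos rfl]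
  have hcur : PySem.List.pyGetD (pvPartial e k.toNat m t) ((t + 1 : Nat) : Int) 0 = -1 := by
    rw [pv_partial_get e k.toNat m t (t + 1) (by omega)]
    rw [if_neg (by omega), if_neg (by omega)]
  unfold pvInnerA
  rw [hi1, hj1, hjc]
  rw [hprev_row, pv_row_get e k.toNat m t (by omega), hrow_i, hcur]
  by_cases hc : pvA e k.toNat m t = -1
  · rw [if_neg (by simpa using hc)]
    -- A leaves row i unchanged: the new partial row is the old one
    have : pvPartial e k.toNat m t = pvPartial e k.toNat m (t + 1) := by
      apply List.ext_getElem
      · simp [pvPartial]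
      · intro j h1 h2
        simp only [pvPartial, List.getElem_map, List.getElem_range]
        by_cases hj : j = 0
        · simp [hj]
        · by_cases hjt : j ≤ t
          · simp [hj, hjt, show j ≤ t + 1 by omega]
          · by_cases hjt1 : j ≤ t + 1
            · have hjeq : j = t + 1 := by omega
              have : pvA e k.toNat (m + 1) (t + 1) = -1 := by
                cases t with
                | zero =>
                    rw [pvA_succ]
                    simp [hc]
                | succ t' =>
                    rw [pvA_succ]
                    simp [hc]
              simp [hj, hjt, hjt1, hjeq, this]
            · simp [hj, hjt, hjt1]
    rw [this]
  · rw [if_pos (by simpa using hc)]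
    rw [if_pos rfl]
    rw [PySem.List.pySetD_of_nonneg _ _ (by push_cast; omega),
        PySem.List.pySetD_of_nonneg _ _ (by push_cast; omega)]
    have htn : ((t + 1 : Nat) : Int).toNat = t + 1 := by omega
    have hmn : ((m + 1 : Nat) : Int).toNat = m + 1 := by omega
    rw [htn, hmn, List.set_set]
    congr 1
    apply List.ext_getElem
    · simp [pvPartial]
    · intro j h1 h2
      rw [List.getElem_set]
      simp only [pvPartial, List.getElem_map, List.getElem_range]
      by_cases hj : j = t + 1
      · have hA : pvA e k.toNat (m + 1) (t + 1) = pvA e k.toNat m t + e.getD m 0 := by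
          rw [pvA_succ]
          simp [show t + 1 ≤ k.toNat by omega, hc]
        simp [hj, hA]
      · have : ¬ (t + 1 = j) := by omega
        simp only [this, if_false]
        by_cases hj0 : j = 0
        · simp [hj0]
        · by_cases hjt : j ≤ t
          · simp [hj0, hjt, show j ≤ t + 1 by omega]
          · simp [hj0, hjt, show ¬ (j ≤ t + 1) by omega]

theorem pv_inner_fold (e : List Int) (k : Int) (hk : 0 ≤ k) (m : Nat) (hm : m < e.length) :
    ∀ T, T ≤ k.toNat →
      (List.range T).foldl
          (fun dp (t : Nat) => pvInnerA ((m + 1 : Nat) : Int) (e.getD m 0) dp (1 + (t : Int)))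
          ((pvTbl e k m).set (m + 1) (pvPartial e k.toNat m 0)) =
        (pvTbl e k m).set (m + 1) (pvPartial e k.toNat m T) := by
  intro T
  induction T with
  | zero => intro _; rfl
  | succ T ih =>
      intro hT
      rw [List.range_succ, List.foldl_append, ih (by omega)]
      simp only [List.foldl_cons, List.foldl_nil]
      exact pv_inner_step e k hk m T hm (by omega)

theorem pv_body_step (e : List Int) (k : Int) (hk : 0 ≤ k) (m : Nat) (hm : m < e.length) :
    pvBodyA e k (pvTbl e k m) (1 + (m : Int)) = pvTbl e k (m + 1) := by
  have hi1 : 1 + (m : Int) - 1 = ((m : Nat) : Int) := by push_cast; ring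
  have hic : 1 + (m : Int) = ((m + 1 : Nat) : Int) := by push_cast; ring
  have hprev : PySem.List.pyGetD (pvTbl e k m) ((m : Nat) : Int) [] = pvRow e k.toNat m := by
    rw [pv_tbl_get e k m m (by omega), if_pos (le_refl m)]
  have hMne : pvLmax (pvRow e k.toNat m) ≠ -1 := by
    have := pvM_nonneg e k.toNat m
    unfold pvM at this
    omega
  have hrowi : PySem.List.pyGetD (pvTbl e k m) ((m + 1 : Nat) : Int) [] = pvRowInit k := by
    rw [pv_tbl_get e k m (m + 1) (by omega), if_neg (by omega)]
  have hset : PySem.List.pySetD (pvTbl e k m) ((m + 1 : Nat) : Int)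
      (PySem.List.pySetD (pvRowInit k) 0 (pvLmax (pvRow e k.toNat m))) =
      (pvTbl e k m).set (m + 1) (pvPartial e k.toNat m 0) := by
    rw [PySem.List.pySetD_of_nonneg _ _ (by push_cast; omega)]
    have h1 : ((m + 1 : Nat) : Int).toNat = m + 1 := by omega
    rw [h1]
    congr 1
    exact pv_partial_zero e k hk m
  have hrange : PySem.List.pyRange 1 (k + 1) 1 =
      (List.range k.toNat).map (fun (t : Nat) => 1 + (t : Int)) := by
    rw [PySem.List.pyRange_one]
    have h1 : (k + 1 - 1).toNat = k.toNat := by omega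
    rw [h1]
  unfold pvBodyA
  simp only []
  rw [hi1, PySem.List.pyGetD_natCast e, hic]
  rw [hprev, pv_map_row e k hk m, pv_maxq _ (pv_row_ne_nil e k.toNat m)]
  rw [if_pos hMne]
  rw [hrowi, hset]
  rw [hrange, List.foldl_map]
  rw [pv_inner_fold e k hk m hm k.toNat (le_refl _)]
  rw [pv_partial_full]
  exact pv_tbl_set_succ e k m hm

theorem pv_outer_fold (e : List Int) (k : Int) (hk : 0 ≤ k) :
    ∀ M, M ≤ e.length →
      (List.range M).foldl (fun dp (t : Nat) => pvBodyA e k dp (1 + (t : Int))) (pvTbl e k 0) =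
        pvTbl e k M := by
  intro M
  induction M with
  | zero => intro _; rfl
  | succ M ih =>
      intro hM
      rw [List.range_succ, List.foldl_append, ih (by omega)]
      simp only [List.foldl_cons, List.foldl_nil]
      exact pv_body_step e k hk M (by omega)

theorem pv_init (e : List Int) (k : Int) (hk : 0 ≤ k) (he : e ≠ []) :
    PySem.List.pySetD ((PySem.List.pyRange 0 ((e.length : Int) + 1) 1).map (fun _ => pvRowInit k)) 0
      (PySem.List.pySetD
        (PySem.List.pyGetD ((PySem.List.pyRange 0 ((e.length : Int) + 1) 1).map (fun _ => pvRowInit k)) 0 [])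
        0 0) = pvTbl e k 0 := by
  have hrep : (PySem.List.pyRange 0 ((e.length : Int) + 1) 1).map (fun _ => pvRowInit k) =
      List.replicate (e.length + 1) (pvRowInit k) := by
    apply List.ext_getElem
    · simp [PySem.List.length_pyRange_one]
    · intro i h1 h2; simp
  rw [hrep]
  have hget : PySem.List.pyGetD (List.replicate (e.length + 1) (pvRowInit k)) 0 [] = pvRowInit k := by
    rw [PySem.List.pyGetD_zero]
    rw [List.getD_eq_getElem _ _ (by simp)]
    simp
  rw [hget]
  rw [PySem.List.pySetD_of_nonneg _ _ (by norm_num)]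
  have hrow0 : PySem.List.pySetD (pvRowInit k) 0 0 = pvRow e k.toNat 0 := by
    rw [PySem.List.pySetD_of_nonneg _ _ (by norm_num), pv_rowInit_eq k hk]
    apply List.ext_getElem
    · simp [pv_length_row]
    · intro j h1 h2
      rw [List.getElem_set]
      have hR : (pvRow e k.toNat 0)[j] = pvA e k.toNat 0 j := by
        unfold pvA
        rw [List.getD_eq_getElem _ _ h2]
      rw [hR, pvA_zero]
      by_cases hj : j = 0
      · simp [hj]
      · simp [hj]
        omega
  rw [hrow0]
  apply List.ext_getElem
  · simp [pvTbl]
  · intro r h1 h2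
    rw [List.getElem_set]
    simp only [pvTbl, List.getElem_map, List.getElem_range, List.getElem_replicate]
    by_cases hr : r = 0
    · simp [hr]
    · simp [show ¬ (r ≤ 0) by omega]
      intro h
      exact absurd h.symm hr

theorem pv_portA_eq (e : List Int) (k : Int) (he : e ≠ []) (hk : 0 ≤ k) :
    maximize_earnings e k =
      (if pvM e k.toNat e.length ≠ -1 then pvM e k.toNat e.length else 0) := by
  have hrange : PySem.List.pyRange 1 ((e.length : Int) + 1) 1 =
      (List.range e.length).map (fun (t : Nat) => 1 + (t : Int)) := by
    rw [PySem.List.pyRange_one]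
    have h1 : ((e.length : Int) + 1 - 1).toNat = e.length := by omega
    rw [h1]
  unfold maximize_earnings
  rw [if_neg he]
  simp only []
  rw [pv_init e k hk he]
  rw [hrange, List.foldl_map]
  rw [pv_outer_fold e k hk e.length (le_refl _)]
  rw [pv_tbl_get e k e.length e.length (le_refl _), if_pos (le_refl _)]
  rw [pv_map_row e k hk e.length]
  rw [pv_maxq _ (pv_row_ne_nil e k.toNat e.length)]
  rfl

-- ---- plumbing for B: prefix-sum list and the H list ----

def pvScan (a : Int) : List Int → List Int
  | [] => []
  | x :: t => (a + x) :: pvScan (a + x) t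

theorem pv_scan_length (l : List Int) (a : Int) : (pvScan a l).length = l.length := by
  induction l generalizing a with
  | nil => rfl
  | cons x t ih => simp [pvScan, ih]

theorem pvS_cons (x : Int) (t : List Int) (j : Nat) : pvS (x :: t) (j + 1) = x + pvS t j := by
  simp [pvS]

theorem pv_scan_getElem :
    ∀ (l : List Int) (a : Int) (j : Nat) (hj : j < (pvScan a l).length),
      (pvScan a l)[j] = a + pvS l (j + 1) := by
  intro l
  induction l with
  | nil => intro a j hj; simp [pvScan] at hj
  | cons x t ih =>
      intro a j hj
      cases j with
      | zero => simp [pvScan, pvS_cons, pvS]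
      | succ j =>
          simp only [pvScan, List.getElem_cons_succ]
          rw [ih (a + x) j (by simpa [pvScan] using hj), pvS_cons]
          ring

theorem pv_fold_P :
    ∀ (l acc : List Int) (h : acc ≠ []),
      l.foldl (fun P x => P ++ [PySem.List.pyGetD P (-1) 0 + x]) acc =
        acc ++ pvScan (acc.getLast h) l := by
  intro l
  induction l with
  | nil => intro acc h; simp [pvScan]
  | cons x t ih =>
      intro acc h
      simp only [List.foldl_cons]
      rw [PySem.List.pyGetD_neg_one _ _ h]
      rw [ih (acc ++ [acc.getLast h + x]) (by simp)]
      simp [pvScan]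

theorem pvP_get (e : List Int) (i : Nat) (hi : i ≤ e.length) :
    PySem.List.pyGetD ((0 : Int) :: pvScan 0 e) ((i : Nat) : Int) 0 = pvS e i := by
  rw [PySem.List.pyGetD_natCast]
  cases i with
  | zero => simp [pvS]
  | succ i =>
      rw [List.getD_cons_succ]
      rw [List.getD_eq_getElem _ _ (by rw [pv_scan_length]; omega)]
      rw [pv_scan_getElem e 0 i (by rw [pv_scan_length]; omega)]
      ring

theorem pv_bodyB_step (e : List Int) (k : Int) (hk : 0 ≤ k) (M : Nat) (hM : M < e.length) :
    pvBodyB k ((0 : Int) :: pvScan 0 e) (pvHlist e k.toNat M) (1 + (M : Int)) =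
      pvHlist e k.toNat (M + 1) := by
  have hi1 : 1 + (M : Int) - 1 = ((M : Nat) : Int) := by push_cast; ring
  have hic : 1 + (M : Int) = ((M + 1 : Nat) : Int) := by push_cast; ring
  have hmt : PySem.List.pyRange 1 ((if k < 1 + (M : Int) then k else 1 + (M : Int)) + 1) 1
      = (List.range (min k.toNat (M + 1))).map (fun (t : Nat) => 1 + (t : Int)) := by
    rw [PySem.List.pyRange_one]
    have h1 : ((if k < 1 + (M : Int) then k else 1 + (M : Int)) + 1 - 1).toNat
        = min k.toNat (M + 1) := by
      split_ifs with h <;> omega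
    rw [h1]
  unfold pvBodyB
  simp only []
  rw [hi1, PySem.List.pyGetD_natCast]
  rw [hmt, List.foldl_map]
  conv_rhs => unfold pvHlist
  refine congrArg (fun z => pvHlist e k.toNat M ++ [z]) ?_
  apply pv_foldl_congr
  intro b t htm
  rw [List.mem_range] at htm
  have htM : t ≤ M := by omega
  have hs : 1 + (M : Int) - (1 + (t : Int)) = ((M - t : Nat) : Int) := by push_cast [htM]; ring
  rw [hs]
  have hcand :
      (if 1 ≤ ((M - t : Nat) : Int) then
          PySem.List.pyGetD (pvHlist e k.toNat M) (((M - t : Nat) : Int) - 1) 0 else 0)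
        + PySem.List.pyGetD ((0 : Int) :: pvScan 0 e) (1 + (M : Int)) 0
        - PySem.List.pyGetD ((0 : Int) :: pvScan 0 e) ((M - t : Nat) : Int) 0
      = (if M - t = 0 then 0 else (pvHlist e k.toNat M).getD (M - t - 1) 0)
        + pvS e (M + 1) - pvS e (M - t) := by
    rw [hic, pvP_get e (M + 1) (by omega), pvP_get e (M - t) (by omega)]
    congr 1
    congr 1
    by_cases h0 : M - t = 0
    · rw [h0]
      norm_num
    · rw [if_pos (by omega), if_neg h0]
      have : ((M - t : Nat) : Int) - 1 = ((M - t - 1 : Nat) : Int) := by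
        push_cast [show 1 ≤ M - t by omega]; ring
      rw [this, PySem.List.pyGetD_natCast]
  rw [hcand]
  rw [max_def]
  split_ifs with h1 h2 h2 <;> omega

theorem pv_outer_fold_B (e : List Int) (k : Int) (hk : 0 ≤ k) :
    ∀ M, M ≤ e.length →
      (List.range M).foldl (fun H (t : Nat) => pvBodyB k ((0 : Int) :: pvScan 0 e) H (1 + (t : Int)))
          [0] = pvHlist e k.toNat M := by
  intro M
  induction M with
  | zero => intro _; rfl
  | succ M ih =>
      intro hM
      rw [List.range_succ, List.foldl_append, ih (by omega)]
      simp only [List.foldl_cons, List.foldl_nil]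
      exact pv_bodyB_step e k hk M (by omega)

theorem pv_portB_eq (e : List Int) (k : Int) (hk : 0 ≤ k) :
    maximize_earnings_alt e k = pvH e k.toNat e.length := by
  unfold maximize_earnings_alt
  simp only []
  rw [pv_fold_P e [0] (by simp)]
  have hP : ([(0 : Int)] : List Int) ++ pvScan (([(0 : Int)] : List Int).getLast (by simp)) e
      = (0 : Int) :: pvScan 0 e := by
    simp
  rw [hP]
  have hrange : PySem.List.pyRange 1 ((e.length : Int) + 1) 1 =
      (List.range e.length).map (fun (t : Nat) => 1 + (t : Int)) := by
    rw [PySem.List.pyRange_one]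
    have h1 : ((e.length : Int) + 1 - 1).toNat = e.length := by omega
    rw [h1]
  rw [hrange, List.foldl_map]
  rw [pv_outer_fold_B e k hk e.length (le_refl _)]
  rw [PySem.List.pyGetD_natCast]
  rfl

theorem pv_portB_nil (e : List Int) (k : Int) (he : e = []) : maximize_earnings_alt e k = 0 := by
  subst he
  simp [maximize_earnings_alt, PySem.List.pyRange_one_eq_nil, PySem.List.pyGetD_zero]

-- ===== VERDICT (by name: the statement is the Claim_ definition above) =====
theorem maximize_earnings_spec : Claim_equal_maximize_earnings := by
  intro e k _ hpre
  unfold Spec_maximize_earnings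
  rcases hpre with he | hk
  · rw [pv_portB_nil e k he]
    simp [maximize_earnings, he]
  · by_cases he : e = []
    · rw [pv_portB_nil e k he]
      simp [maximize_earnings, he]
    · rw [pv_portA_eq e k he hk, pv_portB_eq e k hk, pvM_eq_H]
      have h0 : (0 : Int) ≤ pvH e k.toNat e.length := by
        rw [← pvM_eq_H]; exact pvM_nonneg _ _ _
      have : pvH e k.toNat e.length ≠ -1 := by omega
      simp [this]
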